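-- pv_equiv track=rewrite | github.com/Penitto/go_documentation | go_template/repository.py | _mask_raw_string_literal
-- ===== SOURCE A (Python) =====
-- from typing import Dict, Iterator, List, Optional, Set, Tuple
--
-- def _mask_raw_string_literal(chars: List[str], source: str, start: int) -> int:
--     i = start + 1
--     length = len(source)
--     while i < length:
--         ch = source[i]
--         if ch == "`":
--             return i + 1
--         chars[i] = " " if ch != "\n" else "\n"
--         i += 1
--     return length
-- ===== SOURCE B (Python) =====
-- def _mask_raw_string_literal(chars, source, start):
--     end = source.find("`", start + 1)
--     if end == -1:
--         for i in range(start + 1, len(source)):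
--             chars[i] = "\n" if source[i] == "\n" else " "
--         return len(source)
--     for i in range(start + 1, end):
--         chars[i] = "\n" if source[i] == "\n" else " "
--     return end + 1
-- ===== Notes on version B (the rewrite author's own statement) =====
-- stated objective: simpler
-- what changed: Replaced A's scan-and-mask while-loop (per-character backtick branch inside the masking loop) by a find-then-mask decomposition: one source.find('`', start+1) locates the closing backtick, then a plain fill loop with no backtick test masks the span.
-- outside the precondition, e.g. on _mask_raw_string_literal(['x', 'y', 'z'], '`yz', -3): A returns 1, B returns 3
import Mathlib
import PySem

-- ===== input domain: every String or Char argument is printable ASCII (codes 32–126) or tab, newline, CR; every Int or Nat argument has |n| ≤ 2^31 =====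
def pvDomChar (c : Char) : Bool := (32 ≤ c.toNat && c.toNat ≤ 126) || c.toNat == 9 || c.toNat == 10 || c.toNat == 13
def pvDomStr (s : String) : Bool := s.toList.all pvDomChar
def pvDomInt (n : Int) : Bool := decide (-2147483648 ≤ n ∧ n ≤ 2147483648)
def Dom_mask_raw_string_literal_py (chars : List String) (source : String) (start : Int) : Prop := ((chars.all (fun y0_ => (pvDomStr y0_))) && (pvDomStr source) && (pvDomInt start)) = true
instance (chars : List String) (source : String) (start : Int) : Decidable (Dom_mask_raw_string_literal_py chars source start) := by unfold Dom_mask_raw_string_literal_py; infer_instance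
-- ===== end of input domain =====

-- B replaces A's scan-and-mask while-loop by find-then-mask (one str.find locates the closing
-- backtick, then a plain fill loop with no backtick branch); objective: simpler decomposition.
-- A mutates `chars` in place; the equivalence proved here is about the RETURN value only, so the
-- ports carry only the scan index, not the masked list (B performs the same masking writes in Python).

-- ===== PORT A =====
-- while i < length: if source[i] == '`' return i+1 else (mask) i += 1; return length
def maskLoopA (s : List Char) (i : Nat) : Int :=
  if h : i < s.length then
    if s[i] = '`' then (i : Int) + 1
    else maskLoopA s (i + 1)
  else (s.length : Int)
termination_by s.length - i

def mask_raw_string_literal_py (chars : List String) (source : String) (start : Int) : Int :=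
  -- i = start + 1 (Pre_ gives 0 ≤ start, so toNat is exact)
  maskLoopA source.toList (start + 1).toNat

-- ===== PORT B =====
-- end = source.find("`", start + 1); -1 ↦ none; return length or end + 1
def mask_raw_string_literal_py_alt (chars : List String) (source : String) (start : Int) : Int :=
  let s := source.toList
  match (s.drop (start + 1).toNat).findIdx? (· = '`') with
  | none => (s.length : Int)
  | some j => (((start + 1).toNat + j : Nat) : Int) + 1

-- ===== PRECONDITION & SPEC =====
-- Pre_ excludes (a) negative start, where A's reads via Python's negative indexing wrap around to
-- the end of the string (an artefact B's str.find does not share), and (b) inputs where some masked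
-- position (strictly before the closing backtick) has no slot in chars, on which A raises IndexError.
def Pre_mask_raw_string_literal_py (chars : List String) (source : String) (start : Int) : Prop :=
  0 ≤ start ∧
  ∀ i, i < source.toList.length →
    (start + 1 ≤ (i : Int) ∧ ∀ j, j ≤ i → start + 1 ≤ (j : Int) → source.toList[j]? ≠ some '`') →
    i < chars.length
instance (chars : List String) (source : String) (start : Int) : Decidable (Pre_mask_raw_string_literal_py chars source start) := by unfold Pre_mask_raw_string_literal_py; infer_instance

def pvWitness_mask_raw_string_literal_py : List String × String × Int := (["a", "b", "c"], "a`c", 0)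

def Spec_mask_raw_string_literal_py (chars : List String) (source : String) (start : Int) (out : Int) : Prop := out = mask_raw_string_literal_py_alt chars source start
instance (chars : List String) (source : String) (start : Int) (out : Int) : Decidable (Spec_mask_raw_string_literal_py chars source start out) := by unfold Spec_mask_raw_string_literal_py; infer_instance

-- ===== CLAIM (what is proved, stated in full; the proofs are below) =====
def Claim_equal_mask_raw_string_literal_py : Prop := ∀ (chars : List String) (source : String) (start : Int), Dom_mask_raw_string_literal_py chars source start → Pre_mask_raw_string_literal_py chars source start → Spec_mask_raw_string_literal_py chars source start (mask_raw_string_literal_py chars source start)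

-- ===== LEMMAS AND PROOFS =====

-- A's scan from position i returns exactly what "find the first backtick at or after i" dictates.
theorem maskLoopA_eq_find (s : List Char) (i : Nat) :
    maskLoopA s i =
      match (s.drop i).findIdx? (· = '`') with
      | none => (s.length : Int)
      | some j => ((i + j : Nat) : Int) + 1 := by
  by_cases h : i < s.length
  · rw [maskLoopA, dif_pos h, List.drop_eq_getElem_cons h, List.findIdx?_cons]
    by_cases heq : s[i] = '`'
    · rw [if_pos heq]; simp [heq]
    · rw [if_neg heq, maskLoopA_eq_find s (i + 1)]
      simp only [heq, decide_false, Bool.false_eq_true, if_false]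
      cases hf : (s.drop (i + 1)).findIdx? (· = '`') with
      | none => simp
      | some j =>
        simp only [Option.map_some]
        congr 1
        omega
  · rw [maskLoopA, dif_neg h, List.drop_eq_nil_of_le (by omega)]
    simp [List.findIdx?_nil]
termination_by s.length - i

-- ===== VERDICT (by name: the statement is the Claim_ definition above) =====
theorem mask_raw_string_literal_py_spec : Claim_equal_mask_raw_string_literal_py := by
  intro chars source start _ _
  unfold Spec_mask_raw_string_literal_py mask_raw_string_literal_py mask_raw_string_literal_py_alt
  exact maskLoopA_eq_find source.toList (start + 1).toNat
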